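-- pv_equiv track=rewrite | github.com/kungfuai/CVlization | datasets/omr/pipeline.py | compute_page_ranges
-- ===== SOURCE A (Python) =====
-- def compute_page_ranges(bar_nums_per_page: dict[int, list[int]],
--                         total_measures: int) -> dict[int, tuple[int, int]]:
--     """Compute {page: (bar_start, bar_end)} from bar numbers per page."""
--     active = {p: nums for p, nums in bar_nums_per_page.items() if nums}
--     pages = sorted(active)
--     ranges = {}
--     for i, page in enumerate(pages):
--         bar_start = min(active[page])
--         if bar_start > total_measures:
--             break
--         if i + 1 < len(pages):
--             bar_end = min(active[pages[i + 1]]) - 1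
--         else:
--             bar_end = total_measures
--         ranges[page] = (bar_start, bar_end)
--     return ranges
-- ===== SOURCE B (Python) =====
-- def compute_page_ranges(bar_nums_per_page, total_measures):
--     """Reverse single pass: walk pages from last to first carrying the next page's
--     min in an accumulator; build the result back-to-front, discarding the tail on
--     a page whose min exceeds total_measures (that page's min still serves as the
--     boundary for its predecessor)."""
--     mins = {p: min(nums) for p, nums in bar_nums_per_page.items() if nums}
--     acc = []
--     next_min = None
--     for p in reversed(sorted(mins)):
--         m = mins[p]
--         if m > total_measures:
--             acc = []
--         else:
--             acc.append((p, (m, total_measures if next_min is None else next_min - 1)))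
--         next_min = m
--     return dict(reversed(acc))
-- ===== Notes on version B (the rewrite author's own statement) =====
-- stated objective: alternative
-- what changed: B replaces A's forward indexed loop with lookahead (pages[i+1], re-computed min, break) by a single reverse pass: it walks the sorted pages from last to first carrying the successor's min in an accumulator variable, builds the result back-to-front, and discards the accumulated tail whenever a page's min exceeds total_measures.
import Mathlib
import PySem

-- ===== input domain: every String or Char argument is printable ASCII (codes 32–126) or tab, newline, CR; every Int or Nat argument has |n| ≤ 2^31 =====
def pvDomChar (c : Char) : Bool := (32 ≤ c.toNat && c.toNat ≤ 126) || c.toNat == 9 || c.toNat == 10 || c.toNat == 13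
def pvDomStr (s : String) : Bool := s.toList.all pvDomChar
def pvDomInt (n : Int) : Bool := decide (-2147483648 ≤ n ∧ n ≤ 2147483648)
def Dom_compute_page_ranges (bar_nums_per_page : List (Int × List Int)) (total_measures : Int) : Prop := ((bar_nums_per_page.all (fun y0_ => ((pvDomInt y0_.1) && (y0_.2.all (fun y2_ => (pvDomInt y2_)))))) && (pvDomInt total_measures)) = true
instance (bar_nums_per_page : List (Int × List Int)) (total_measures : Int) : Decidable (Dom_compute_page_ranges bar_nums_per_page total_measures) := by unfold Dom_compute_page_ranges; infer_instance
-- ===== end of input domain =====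

-- B walks the sorted pages in REVERSE, carrying the successor page's min in an accumulator
-- and building the result back-to-front (discarding the accumulated tail at a page whose min
-- exceeds total_measures), instead of A's forward indexed loop with a pages[i+1] lookahead
-- and break; objective: alternative decomposition, same asymptotic cost.

-- ===== PORT A =====
-- min(xs) for a NONEMPTY xs (both Pythons only call min on nonempty lists; default never used)
def pyMin (xs : List Int) : Int := (PySem.List.min? xs (fun x => x)).getD 0

-- the 'for i, page in enumerate(pages)' loop with break, as structural recursion over the
-- remaining suffix of pages: 'i + 1 < len(pages)' ↔ the suffix has a successor, and
-- 'pages[i + 1]' is that successor's head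
def pvALoop (active : PySem.Dict Int (List Int)) (total_measures : Int) : List Int → List (Int × Int × Int)
  | [] => []
  | page :: rest =>
    let bar_start := pyMin (active.getD page [])
    if bar_start > total_measures then []
    else
      let bar_end :=
        match rest with
        | [] => total_measures
        | p2 :: _ => pyMin (active.getD p2 []) - 1
      (page, bar_start, bar_end) :: pvALoop active total_measures rest

def compute_page_ranges (bar_nums_per_page : List (Int × List Int)) (total_measures : Int) : List (Int × Int × Int) :=
  let active := PySem.Dict.mk (((PySem.Dict.ofList bar_nums_per_page).items).filter (fun pr => !pr.2.isEmpty))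
  let pages := PySem.List.sorted active.keys (fun x => x)
  pvALoop active total_measures pages

-- ===== PORT B =====
-- one iteration of B's 'for p in reversed(sorted(mins))' loop: state = (acc, next_min);
-- m > total_measures resets acc to [] (the discarded tail), otherwise appends to acc
-- (acc holds the result back-to-front relative to the final 'reversed(acc)')
def pvBStep (total_measures : Int) (mins : PySem.Dict Int Int)
    (st : List (Int × Int × Int) × Option Int) (p : Int) : List (Int × Int × Int) × Option Int :=
  let m := mins.getD p 0
  ((if m > total_measures then []
    else st.1 ++ [(p, m, match st.2 with | none => total_measures | some v => v - 1)]),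
   some m)

def compute_page_ranges_alt (bar_nums_per_page : List (Int × List Int)) (total_measures : Int) : List (Int × Int × Int) :=
  let mins := PySem.Dict.mk
    (((PySem.Dict.ofList bar_nums_per_page).items.filter (fun pr => !pr.2.isEmpty)).map
      (fun pr => (pr.1, pyMin pr.2)))
  let pages := PySem.List.sorted mins.keys (fun x => x)
  ((pages.reverse.foldl (pvBStep total_measures mins) ([], none)).1).reverse

-- ===== PRECONDITION & SPEC =====
def Spec_compute_page_ranges (bar_nums_per_page : List (Int × List Int)) (total_measures : Int) (out : List (Int × Int × Int)) : Prop := out = compute_page_ranges_alt bar_nums_per_page total_measures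
instance (bar_nums_per_page : List (Int × List Int)) (total_measures : Int) (out : List (Int × Int × Int)) : Decidable (Spec_compute_page_ranges bar_nums_per_page total_measures out) := by unfold Spec_compute_page_ranges; infer_instance

-- ===== CLAIM (what is proved, stated in full; the proofs are below) =====
def Claim_equal_compute_page_ranges : Prop := ∀ (bar_nums_per_page : List (Int × List Int)) (total_measures : Int), Dom_compute_page_ranges bar_nums_per_page total_measures → Spec_compute_page_ranges bar_nums_per_page total_measures (compute_page_ranges bar_nums_per_page total_measures)

-- ===== LEMMAS AND PROOFS =====

-- common reference shape both loops reduce to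
def pvCore (total_measures : Int) : List (Int × Int) → List (Int × Int × Int)
  | [] => []
  | (p, m) :: rest =>
    if m > total_measures then []
    else (p, m, match rest with | [] => total_measures | (_, m2) :: _ => m2 - 1) :: pvCore total_measures rest

-- pvBStep with the (page, min) pair given directly (no dict lookup)
def pvPairStep (total_measures : Int)
    (st : List (Int × Int × Int) × Option Int) (pm : Int × Int) : List (Int × Int × Int) × Option Int :=
  ((if pm.2 > total_measures then []
    else st.1 ++ [(pm.1, pm.2, match st.2 with | none => total_measures | some v => v - 1)]),
   some pm.2)

lemma pvALoop_eq_core (act : List (Int × List Int)) (hnd : (act.map Prod.fst).Nodup)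
    (tm : Int) (L : List (Int × List Int)) (hsub : ∀ pr ∈ L, pr ∈ act) :
    pvALoop (PySem.Dict.mk act) tm (L.map Prod.fst)
      = pvCore tm (L.map (fun pr => (pr.1, pyMin pr.2))) := by
  have hknd : (PySem.Dict.mk act).keys.Nodup := by simpa [PySem.Dict.keys] using hnd
  induction L with
  | nil => rfl
  | cons pr L ih =>
    obtain ⟨p, nums⟩ := pr
    have hget : (PySem.Dict.mk act).getD p [] = nums :=
      PySem.Dict.getD_of_mem_items _ (hsub _ (by simp)) hknd []
    simp only [List.map_cons, pvALoop, pvCore, hget]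
    by_cases hbs : pyMin nums > tm
    · simp [hbs]
    · have hrest := ih (fun q hq => hsub q (List.mem_cons_of_mem _ hq))
      cases L with
      | nil => simp [pvALoop, pvCore, hbs]
      | cons pr2 L2 =>
        obtain ⟨p2, nums2⟩ := pr2
        have hget2 : (PySem.Dict.mk act).getD p2 [] = nums2 :=
          PySem.Dict.getD_of_mem_items _ (hsub _ (by simp)) hknd []
        simp only [List.map_cons] at hrest ⊢
        simp [hbs, hget2, hrest]

-- eliminate the dict lookup: B's fold over page keys equals the fold over (page, min) pairs
lemma pvBFold_lookup (act : List (Int × List Int)) (hnd : (act.map Prod.fst).Nodup) (tm : Int)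
    (mins : PySem.Dict Int Int)
    (hmins : mins = PySem.Dict.mk (act.map (fun pr => (pr.1, pyMin pr.2))))
    (M : List (Int × List Int)) (hsub : ∀ pr ∈ M, pr ∈ act)
    (init : List (Int × Int × Int) × Option Int) :
    (M.map Prod.fst).foldl (pvBStep tm mins) init
      = (M.map (fun pr => (pr.1, pyMin pr.2))).foldl (pvPairStep tm) init := by
  have hknd : mins.keys.Nodup := by
    subst hmins
    simpa [PySem.Dict.keys, List.map_map, Function.comp] using hnd
  induction M generalizing init with
  | nil => rfl
  | cons pr M ih =>
    obtain ⟨p, nums⟩ := pr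
    have hmem : (p, pyMin nums) ∈ act.map (fun pr => (pr.1, pyMin pr.2)) :=
      List.mem_map.mpr ⟨(p, nums), hsub _ (by simp), rfl⟩
    have hget : mins.getD p 0 = pyMin nums := by
      subst hmins
      exact PySem.Dict.getD_of_mem_items _ hmem hknd 0
    simp only [List.map_cons, List.foldl_cons]
    rw [show pvBStep tm mins init p = pvPairStep tm init (p, pyMin nums) by
          simp [pvBStep, pvPairStep, hget]]
    exact ih (fun q hq => hsub q (List.mem_cons_of_mem _ hq)) _

-- the reverse-fold invariant: folding the pair step over T.reverse yields pvCore reversed,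
-- together with the head's min as next_min
lemma pvBFold_core (tm : Int) (T : List (Int × Int)) :
    T.reverse.foldl (pvPairStep tm) ([], none)
      = ((pvCore tm T).reverse, T.head?.map Prod.snd) := by
  induction T with
  | nil => rfl
  | cons x rest ih =>
    obtain ⟨p, m⟩ := x
    rw [List.reverse_cons, List.foldl_append, ih]
    by_cases h : m > tm
    · simp [pvPairStep, pvCore, h]
    · cases rest with
      | nil => simp [pvPairStep, pvCore, h]
      | cons y rest' =>
        obtain ⟨q, m2⟩ := y
        simp [pvPairStep, pvCore, h]

-- ===== VERDICT (by name: the statement is the Claim_ definition above) =====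
theorem compute_page_ranges_spec : Claim_equal_compute_page_ranges := by
  intro b tm _
  unfold Spec_compute_page_ranges
  set act := (PySem.Dict.ofList b).items.filter (fun pr => !pr.2.isEmpty) with hact
  have hnd : (act.map Prod.fst).Nodup := by
    have h0 : ((PySem.Dict.ofList b).items.map Prod.fst).Nodup := by
      simpa [PySem.Dict.keys] using PySem.Dict.nodup_keys_ofList b
    exact List.Nodup.sublist (List.Sublist.map Prod.fst List.filter_sublist) h0
  set S := PySem.List.sorted act (fun pr => pr.1) with hS
  have hSlt : S.Pairwise (fun a b => a.1 < b.1) := by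
    have hle : S.Pairwise (fun a b => a.1 ≤ b.1) := PySem.List.sorted_pairwise act _
    have hperm : (S.map Prod.fst).Perm (act.map Prod.fst) :=
      (PySem.List.sorted_perm act _ false).map Prod.fst
    have hne : S.Pairwise (fun a b => a.1 ≠ b.1) :=
      List.pairwise_map.mp (hperm.nodup_iff.mpr hnd)
    exact (hle.and hne).imp (fun h => lt_of_le_of_ne h.1 h.2)
  have hpages : PySem.List.sorted (act.map Prod.fst) (fun x => x) = S.map Prod.fst :=
    PySem.List.sorted_eq_of_perm_of_pairwise_lt _ _ _
      ((PySem.List.sorted_perm act _ false).map Prod.fst)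
      (List.pairwise_map.mpr hSlt)
  have hmemS : ∀ pr ∈ S, pr ∈ act := fun pr h => (PySem.List.mem_sorted act _ false pr).mp h
  have hmemSr : ∀ pr ∈ S.reverse, pr ∈ act := fun pr h => hmemS pr (List.mem_reverse.mp h)
  have hA : compute_page_ranges b tm = pvCore tm (S.map (fun pr => (pr.1, pyMin pr.2))) := by
    simp only [compute_page_ranges, ← hact, PySem.Dict.keys_mk, hpages]
    exact pvALoop_eq_core act hnd tm S hmemS
  have hkeys : (PySem.Dict.mk (act.map (fun pr => (pr.1, pyMin pr.2)))).keys = act.map Prod.fst := by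
    simp [PySem.Dict.keys, List.map_map, Function.comp]
  have hB : compute_page_ranges_alt b tm = pvCore tm (S.map (fun pr => (pr.1, pyMin pr.2))) := by
    simp only [compute_page_ranges_alt, ← hact, hkeys, hpages]
    rw [← List.map_reverse, pvBFold_lookup act hnd tm _ rfl S.reverse hmemSr,
        List.map_reverse, ← List.map_reverse,
        show (S.reverse.map (fun pr => (pr.1, pyMin pr.2)))
            = (S.map (fun pr => (pr.1, pyMin pr.2))).reverse by rw [List.map_reverse],
        pvBFold_core]
    simp
  rw [hA, hB]
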